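-- pv_equiv track=rewrite | github.com/gmltmd23/Algorithm-Study | 2023 Study/소프티어/이분탐색/[이분탐색] 소프티어_LEVEL3_슈퍼컴퓨터 클러스터.py | isUpgradable
-- ===== SOURCE A (Python) =====
-- def isUpgradable(performanceList, limitBalance, limitPerformance):
--     total = 0
--     for i in range(len(performanceList)):
--         if performanceList[i] >= limitPerformance:
--             return True
--         upgradeCost = pow((limitPerformance - performanceList[i]), 2)
--         if (total + upgradeCost) <= limitBalance:
--             total += upgradeCost
--         else:
--             return False
--     return True
-- ===== SOURCE B (Python) =====
-- def isUpgradable(performanceList, limitBalance, limitPerformance):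
--     # index of the first machine that already meets the limit (or len if none)
--     idx = next((i for i, p in enumerate(performanceList) if p >= limitPerformance),
--                len(performanceList))
--     if idx == 0:
--         return True  # no upgrade needed before the first satisfying machine
--     return sum((limitPerformance - p) ** 2 for p in performanceList[:idx]) <= limitBalance
-- ===== Notes on version B (the rewrite author's own statement) =====
-- stated objective: simpler
-- what changed: Replaces A's imperative accumulate-with-two-early-exits loop by a prefix-then-reduce formulation: find the first element already meeting the performance limit, sum the squared upgrade costs of the prefix before it, and make one final comparison with the balance (valid because the costs are nonnegative, so the running guard equals the final prefix-sum check).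
import Mathlib
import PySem

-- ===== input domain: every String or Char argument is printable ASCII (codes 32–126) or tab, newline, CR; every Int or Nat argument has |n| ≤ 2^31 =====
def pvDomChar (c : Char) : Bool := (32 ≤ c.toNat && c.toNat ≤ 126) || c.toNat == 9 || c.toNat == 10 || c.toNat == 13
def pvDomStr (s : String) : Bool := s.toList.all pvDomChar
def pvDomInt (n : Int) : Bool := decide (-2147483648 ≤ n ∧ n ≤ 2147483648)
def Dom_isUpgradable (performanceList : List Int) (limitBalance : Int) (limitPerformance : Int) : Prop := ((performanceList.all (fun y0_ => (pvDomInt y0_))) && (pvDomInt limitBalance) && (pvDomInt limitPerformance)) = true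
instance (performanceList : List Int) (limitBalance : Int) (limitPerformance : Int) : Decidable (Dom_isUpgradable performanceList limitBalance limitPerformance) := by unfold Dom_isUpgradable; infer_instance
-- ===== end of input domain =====

-- B replaces A's guarded accumulation loop by "find the first element meeting the limit,
-- sum the squared costs of the prefix before it, compare once" (objective: simpler).

-- ===== PORT A =====
-- A's for-loop with early returns, as structural recursion carrying the running total.
def isUpgradableGo (limitBalance : Int) (limitPerformance : Int) : List Int → Int → Bool
  | [], _ => true
  | p :: rest, total =>
    if p ≥ limitPerformance then true
    else
      let upgradeCost := (limitPerformance - p) ^ 2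
      if total + upgradeCost ≤ limitBalance then
        isUpgradableGo limitBalance limitPerformance rest (total + upgradeCost)
      else false

def isUpgradable (performanceList : List Int) (limitBalance : Int) (limitPerformance : Int) : Bool :=
  isUpgradableGo limitBalance limitPerformance performanceList 0

-- ===== PORT B =====
-- Source B: idx = first index with p >= limitPerformance (len if none); if idx == 0 return True;
-- else sum the squared costs of performanceList[:idx] and compare with limitBalance once.
def isUpgradable_alt (performanceList : List Int) (limitBalance : Int) (limitPerformance : Int) : Bool :=
  let idx := performanceList.findIdx (fun p => limitPerformance ≤ p)
  if idx = 0 then true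
  else decide ((((performanceList.take idx).map (fun p => (limitPerformance - p) ^ 2)).sum) ≤ limitBalance)

-- ===== PRECONDITION & SPEC =====
def Spec_isUpgradable (performanceList : List Int) (limitBalance : Int) (limitPerformance : Int) (out : Bool) : Prop := out = isUpgradable_alt performanceList limitBalance limitPerformance
instance (performanceList : List Int) (limitBalance : Int) (limitPerformance : Int) (out : Bool) : Decidable (Spec_isUpgradable performanceList limitBalance limitPerformance out) := by unfold Spec_isUpgradable; infer_instance

-- ===== CLAIM (what is proved, stated in full; the proofs are below) =====
def Claim_equal_isUpgradable : Prop := ∀ (performanceList : List Int) (limitBalance : Int) (limitPerformance : Int), Dom_isUpgradable performanceList limitBalance limitPerformance → Spec_isUpgradable performanceList limitBalance limitPerformance (isUpgradable performanceList limitBalance limitPerformance)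

-- ===== LEMMAS AND PROOFS =====

-- the summed upgrade costs are squares, hence nonnegative
lemma costSum_nonneg (lp : Int) (l : List Int) :
    0 ≤ ((l.map (fun p => (lp - p) ^ 2)).sum) := by
  induction l with
  | nil => simp
  | cons p rest ih =>
    simp only [List.map_cons, List.sum_cons]
    have := sq_nonneg (lp - p)
    omega

-- main invariant: the guarded loop with running total `total` equals B's single comparison
-- shifted by `total`
lemma go_eq (lb lp : Int) : ∀ (pl : List Int) (total : Int),
    isUpgradableGo lb lp pl total =
      (let idx := pl.findIdx (fun p => lp ≤ p)
       if idx = 0 then true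
       else decide (total + (((pl.take idx).map (fun p => (lp - p) ^ 2)).sum) ≤ lb)) := by
  intro pl
  induction pl with
  | nil => intro total; simp [isUpgradableGo, List.findIdx_nil]
  | cons p rest ih =>
    intro total
    by_cases hp : lp ≤ p
    · simp [isUpgradableGo, List.findIdx_cons, hp, ge_iff_le]
    · have hfi : (p :: rest).findIdx (fun q => lp ≤ q) = rest.findIdx (fun q => lp ≤ q) + 1 := by
        simp [List.findIdx_cons, hp]
      have hge : ¬ p ≥ lp := hp
      simp only [isUpgradableGo, hfi, ge_iff_le, hp, if_false]
      have hnz : ¬ (rest.findIdx (fun q => lp ≤ q) + 1 = 0) := by omega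
      simp only [hnz, if_false, List.take_succ_cons, List.map_cons, List.sum_cons]
      by_cases hc : total + (lp - p) ^ 2 ≤ lb
      · simp only [hc, if_true]
        rw [ih (total + (lp - p) ^ 2)]
        by_cases h0 : rest.findIdx (fun q => lp ≤ q) = 0
        · simp only [h0, if_true]
          simp [hc]
        · simp only [h0, if_false]
          congr 1
          simp only [eq_iff_iff]
          constructor <;> intro h <;> omega
      · simp only [hc, if_false]
        have hS := costSum_nonneg lp (rest.take (rest.findIdx (fun q => lp ≤ q)))
        have : ¬ (total + ((lp - p) ^ 2 + ((rest.take (rest.findIdx (fun q => lp ≤ q))).map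
            (fun q => (lp - q) ^ 2)).sum) ≤ lb) := by omega
        exact (decide_eq_false this).symm

-- ===== VERDICT (by name: the statement is the Claim_ definition above) =====
theorem isUpgradable_spec : Claim_equal_isUpgradable := by
  intro pl lb lp _
  unfold Spec_isUpgradable isUpgradable isUpgradable_alt
  rw [go_eq]
  simp only []
  by_cases h0 : pl.findIdx (fun p => lp ≤ p) = 0
  · simp [h0]
  · simp only [h0, if_false]
    congr 1
    simp only [eq_iff_iff]
    constructor <;> intro h <;> omega
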